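-- pv_equiv track=rewrite | github.com/vlaxcs/FMI-INFO-S15-2024-2027 | Anul I - Licenta/Semestrul I/Programarea Algoritmilor/Seminare/Seminarul 5/PP03. Autostrada/autostrada.py | computeRoadStats
-- ===== SOURCE A (Python) =====
-- def computeRoadStats(roadLength, reports):
--     safeAreas = []
--     damagedAreas = []
--
--     lastSafeArea = 0
--     maxLeft = reports[0][0]
--     maxRight = reports[0][1]
--     damageLength = maxRight - maxLeft
--
--     for report in reports[1:]:
--         if report[1] <= maxRight:
--             continue
--         elif report[0] < maxRight:
--             damageLength += report[1] - maxRight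
--             maxRight = report[1]
--         else:
--             if lastSafeArea < maxLeft:
--                 safeAreas.append((lastSafeArea, maxLeft))
--             damagedAreas.append([maxLeft, maxRight])
--
--             lastSafeArea = maxRight
--             maxLeft = report[0]
--             maxRight = report[1]
--             damageLength += maxRight - maxLeft
--
--     damagedAreas.append([maxLeft, maxRight])
--     if lastSafeArea < maxLeft:
--         safeAreas.append((lastSafeArea, maxLeft))
--     if maxRight < roadLength:
--         safeAreas.append((maxRight, roadLength))
--     damageRate = (damageLength * 100) // roadLength
--
--     return damagedAreas, safeAreas, damageRate
-- ===== SOURCE B (Python) =====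
-- def computeRoadStats(roadLength, reports):
--     # Phase 1: build the merged damaged intervals, tracking only the merged list
--     # (same three-way branch semantics as the original, but the state is the list
--     # itself, updated at its tail).
--     merged = [reports[0]]
--     for l, r in reports[1:]:
--         lastL, lastR = merged[-1]
--         if r <= lastR:
--             continue
--         elif l < lastR:
--             merged[-1] = (lastL, r)
--         else:
--             merged.append((l, r))
--
--     # Phase 2: derive safe areas and total damage from the merged intervals.
--     safeAreas = []
--     prev = 0
--     for l, r in merged:
--         if prev < l:
--             safeAreas.append((prev, l))
--         prev = r
--     if prev < roadLength:
--         safeAreas.append((prev, roadLength))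
--
--     damageLength = sum(r - l for l, r in merged)
--     damageRate = (damageLength * 100) // roadLength
--
--     return [[l, r] for l, r in merged], safeAreas, damageRate
-- ===== Notes on version B (the rewrite author's own statement) =====
-- stated objective: simpler
-- what changed: B splits A's single interleaved loop into a merge pass that only builds the merged interval list, then derives safe areas and the total damage length in separate passes over that list, instead of threading six pieces of state through one loop.
-- outside the precondition, e.g. on computeRoadStats(10, []): A raises IndexError, B raises IndexError; on computeRoadStats(0, [(1, 2)]): A raises ZeroDivisionError, B raises ZeroDivisionError
import Mathlib
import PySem

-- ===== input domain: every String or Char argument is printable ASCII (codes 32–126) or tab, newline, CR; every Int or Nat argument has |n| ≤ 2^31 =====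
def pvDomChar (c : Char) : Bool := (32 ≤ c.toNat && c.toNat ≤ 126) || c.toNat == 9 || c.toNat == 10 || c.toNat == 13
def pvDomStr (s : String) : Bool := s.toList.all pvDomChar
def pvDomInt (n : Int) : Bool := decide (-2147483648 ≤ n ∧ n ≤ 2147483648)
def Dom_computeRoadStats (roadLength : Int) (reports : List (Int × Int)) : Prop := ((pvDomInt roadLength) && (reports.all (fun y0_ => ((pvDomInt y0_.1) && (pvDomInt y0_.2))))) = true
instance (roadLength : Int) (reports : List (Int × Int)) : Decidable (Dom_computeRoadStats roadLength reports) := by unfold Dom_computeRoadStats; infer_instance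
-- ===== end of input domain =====

-- B splits A's single six-state loop into a merge pass building the merged interval
-- list, then derives safe areas and the damage length in separate passes (objective: simpler).

def pvSum (d : List (Int × Int)) : Int := d.foldl (fun s p => s + (p.2 - p.1)) 0

-- ===== PORT A =====
-- state: (safeAreas, damagedAreas, lastSafeArea, maxLeft, maxRight, damageLength)
def pvStepA (st : List (Int × Int) × List (List Int) × Int × Int × Int × Int) (rep : Int × Int) :
    List (Int × Int) × List (List Int) × Int × Int × Int × Int :=
  match st with
  | (safeAreas, damagedAreas, lastSafeArea, maxLeft, maxRight, damageLength) =>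
    if rep.2 ≤ maxRight then (safeAreas, damagedAreas, lastSafeArea, maxLeft, maxRight, damageLength)
    else if rep.1 < maxRight then
      (safeAreas, damagedAreas, lastSafeArea, maxLeft, rep.2, damageLength + (rep.2 - maxRight))
    else
      ((if lastSafeArea < maxLeft then safeAreas ++ [(lastSafeArea, maxLeft)] else safeAreas),
       damagedAreas ++ [[maxLeft, maxRight]],
       maxRight, rep.1, rep.2, damageLength + (rep.2 - rep.1))

def computeRoadStats (roadLength : Int) (reports : List (Int × Int)) : List (List Int) × (List (Int × Int)) × Int :=
  match reports with
  | [] => ([], [], 0)  -- Python raises IndexError here; excluded by Pre_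
  | (l0, r0) :: rest =>
    match rest.foldl pvStepA ([], [], 0, l0, r0, r0 - l0) with
    | (safeAreas, damagedAreas, lastSafeArea, maxLeft, maxRight, damageLength) =>
      let damagedAreas := damagedAreas ++ [[maxLeft, maxRight]]
      let safeAreas := if lastSafeArea < maxLeft then safeAreas ++ [(lastSafeArea, maxLeft)] else safeAreas
      let safeAreas := if maxRight < roadLength then safeAreas ++ [(maxRight, roadLength)] else safeAreas
      (damagedAreas, safeAreas, PySem.Int.floordiv (damageLength * 100) roadLength)

-- ===== PORT B =====
-- Phase 1 step: merge a report into the list, updating the last interval.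
def pvStepB (merged : List (Int × Int)) (rep : Int × Int) : List (Int × Int) :=
  let last := merged.getLast!
  if rep.2 ≤ last.2 then merged
  else if rep.1 < last.2 then merged.dropLast ++ [(last.1, rep.2)]
  else merged ++ [rep]

-- Phase 2 step: accumulate (safeAreas, prev).
def pvGapStep (st : List (Int × Int) × Int) (p : Int × Int) : List (Int × Int) × Int :=
  ((if st.2 < p.1 then st.1 ++ [(st.2, p.1)] else st.1), p.2)

def computeRoadStats_alt (roadLength : Int) (reports : List (Int × Int)) : List (List Int) × (List (Int × Int)) × Int :=
  match reports with
  | [] => ([], [], 0)  -- Python raises IndexError here; excluded by Pre_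
  | first :: rest =>
    let merged := rest.foldl pvStepB [first]
    let g := merged.foldl pvGapStep ([], 0)
    let safeAreas := if g.2 < roadLength then g.1 ++ [(g.2, roadLength)] else g.1
    let damageLength := pvSum merged
    (merged.map (fun p => [p.1, p.2]), safeAreas, PySem.Int.floordiv (damageLength * 100) roadLength)

-- ===== PRECONDITION & SPEC =====
-- Python A raises IndexError on reports = [] and ZeroDivisionError on roadLength = 0.
def Pre_computeRoadStats (roadLength : Int) (reports : List (Int × Int)) : Prop :=
  reports ≠ [] ∧ roadLength ≠ 0
instance (roadLength : Int) (reports : List (Int × Int)) : Decidable (Pre_computeRoadStats roadLength reports) := by unfold Pre_computeRoadStats; infer_instance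
def pvWitness_computeRoadStats : Int × (List (Int × Int)) := (10, [(1, 3), (5, 7)])

def Spec_computeRoadStats (roadLength : Int) (reports : List (Int × Int)) (out : List (List Int) × (List (Int × Int)) × Int) : Prop := out = computeRoadStats_alt roadLength reports
instance (roadLength : Int) (reports : List (Int × Int)) (out : List (List Int) × (List (Int × Int)) × Int) : Decidable (Spec_computeRoadStats roadLength reports out) := by unfold Spec_computeRoadStats; infer_instance

-- ===== CLAIM (what is proved, stated in full; the proofs are below) =====
def Claim_equal_computeRoadStats : Prop := ∀ (roadLength : Int) (reports : List (Int × Int)), Dom_computeRoadStats roadLength reports → Pre_computeRoadStats roadLength reports → Spec_computeRoadStats roadLength reports (computeRoadStats roadLength reports)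

-- ===== LEMMAS AND PROOFS =====

-- getLast! of a list ending in x (used throughout the proofs)
theorem pvGetLast_concat (d : List (Int × Int)) (x : Int × Int) : (d ++ [x]).getLast! = x := by
  induction d with
  | nil => rfl
  | cons a d ih => rw [List.cons_append, List.getLast!_cons_eq_getLastD, List.getLastD_concat]

lemma pvSum_concat (d : List (Int × Int)) (p : Int × Int) :
    pvSum (d ++ [p]) = pvSum d + (p.2 - p.1) := by
  simp [pvSum, List.foldl_append]

lemma pvGap_concat (d : List (Int × Int)) (p : Int × Int) :
    (d ++ [p]).foldl pvGapStep ([], 0) = pvGapStep (d.foldl pvGapStep ([], 0)) p := by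
  simp [List.foldl_append]

-- The loop invariant: A's fold state is determined by B's merged list d ++ [(l, r)].
lemma pv_loop (rest : List (Int × Int)) : ∀ (d : List (Int × Int)) (l r : Int),
    rest.foldl pvStepA ((d.foldl pvGapStep ([], 0)).1, d.map (fun p => [p.1, p.2]),
        (d.foldl pvGapStep ([], 0)).2, l, r, pvSum d + (r - l))
    = (let m := rest.foldl pvStepB (d ++ [(l, r)]);
       ((m.dropLast.foldl pvGapStep ([], 0)).1, m.dropLast.map (fun p => [p.1, p.2]),
        (m.dropLast.foldl pvGapStep ([], 0)).2, m.getLast!.1, m.getLast!.2, pvSum m)) := by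
  induction rest with
  | nil =>
    intro d l r
    simp only [List.foldl_nil, List.dropLast_concat, pvGetLast_concat, pvSum_concat]
  | cons rep rest ih =>
    intro d l r
    simp only [List.foldl_cons]
    by_cases h1 : rep.2 ≤ r
    · have hA : pvStepA ((d.foldl pvGapStep ([], 0)).1, d.map (fun p => [p.1, p.2]),
          (d.foldl pvGapStep ([], 0)).2, l, r, pvSum d + (r - l)) rep
          = ((d.foldl pvGapStep ([], 0)).1, d.map (fun p => [p.1, p.2]),
          (d.foldl pvGapStep ([], 0)).2, l, r, pvSum d + (r - l)) := by
        simp only [pvStepA]; rw [if_pos h1]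
      have hB : pvStepB (d ++ [(l, r)]) rep = d ++ [(l, r)] := by
        simp only [pvStepB, pvGetLast_concat]; rw [if_pos h1]
      rw [hA, hB]; exact ih d l r
    · by_cases h2 : rep.1 < r
      · have hA : pvStepA ((d.foldl pvGapStep ([], 0)).1, d.map (fun p => [p.1, p.2]),
            (d.foldl pvGapStep ([], 0)).2, l, r, pvSum d + (r - l)) rep
            = ((d.foldl pvGapStep ([], 0)).1, d.map (fun p => [p.1, p.2]),
            (d.foldl pvGapStep ([], 0)).2, l, rep.2, pvSum d + (rep.2 - l)) := by
          simp only [pvStepA]; rw [if_neg h1, if_pos h2]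
          refine congrArg _ (congrArg _ (congrArg _ (congrArg _ (congrArg _ ?_))))
          ring
        have hB : pvStepB (d ++ [(l, r)]) rep = d ++ [(l, rep.2)] := by
          simp only [pvStepB, pvGetLast_concat, List.dropLast_concat]
          rw [if_neg h1, if_pos h2]
        rw [hA, hB]; exact ih d l rep.2
      · have hA : pvStepA ((d.foldl pvGapStep ([], 0)).1, d.map (fun p => [p.1, p.2]),
            (d.foldl pvGapStep ([], 0)).2, l, r, pvSum d + (r - l)) rep
            = (((d ++ [(l, r)]).foldl pvGapStep ([], 0)).1,
               (d ++ [(l, r)]).map (fun p => [p.1, p.2]),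
               ((d ++ [(l, r)]).foldl pvGapStep ([], 0)).2,
               rep.1, rep.2, pvSum (d ++ [(l, r)]) + (rep.2 - rep.1)) := by
          simp only [pvStepA]; rw [if_neg h1, if_neg h2]
          simp only [pvGap_concat, pvGapStep, pvSum_concat, List.map_append, List.map_cons,
            List.map_nil]
        have hB : pvStepB (d ++ [(l, r)]) rep = (d ++ [(l, r)]) ++ [rep] := by
          simp only [pvStepB, pvGetLast_concat]
          rw [if_neg h1, if_neg h2]
        rw [hA, hB]; exact ih (d ++ [(l, r)]) rep.1 rep.2

-- B's merge loop always produces a nonempty list of the form d' ++ [p].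
lemma pv_shape (rest : List (Int × Int)) : ∀ (d : List (Int × Int)) (l r : Int),
    ∃ d' p, rest.foldl pvStepB (d ++ [(l, r)]) = d' ++ [p] := by
  induction rest with
  | nil => intro d l r; exact ⟨d, (l, r), rfl⟩
  | cons rep rest ih =>
    intro d l r
    simp only [List.foldl_cons, pvStepB, pvGetLast_concat, List.dropLast_concat]
    by_cases h1 : rep.2 ≤ r
    · simpa [h1] using ih d l r
    · by_cases h2 : rep.1 < r
      · simpa [h1, h2] using ih d l rep.2
      · simpa [h1, h2] using ih (d ++ [(l, r)]) rep.1 rep.2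

-- ===== VERDICT (by name: the statement is the Claim_ definition above) =====
theorem computeRoadStats_spec : Claim_equal_computeRoadStats := by
  intro roadLength reports _ hpre
  unfold Spec_computeRoadStats
  match reports with
  | [] => exact absurd rfl hpre.1
  | (l0, r0) :: rest =>
    have h := pv_loop rest [] l0 r0
    obtain ⟨d', p, hm⟩ := pv_shape rest [] l0 r0
    simp only [List.nil_append] at h hm
    simp only [List.foldl_nil, List.map_nil, pvSum, List.foldl_nil, zero_add] at h
    rw [hm] at h
    simp only [List.dropLast_concat, pvGetLast_concat] at h
    simp only [computeRoadStats, computeRoadStats_alt, hm, h]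
    simp only [pvGapStep, pvSum, List.map_append, List.map_cons,
      List.map_nil, List.foldl_append, List.foldl_cons, List.foldl_nil]
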